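-- pv_equiv track=rewrite | github.com/lafont051645clomany/envdiff | envdiff/differ.py | build_unified_diff
-- ===== SOURCE A (Python) =====
-- from typing import Dict, List, Tuple
--
-- def build_unified_diff(
--     env_a: Dict[str, str],
--     env_b: Dict[str, str],
--     label_a: str = "a",
--     label_b: str = "b",
-- ) -> List[str]:
--     """Return a list of unified-diff-style lines comparing env_a to env_b."""
--     lines: List[str] = []
--     lines.append(f"--- {label_a}")
--     lines.append(f"+++ {label_b}")
--
--     all_keys = sorted(set(env_a) | set(env_b))
--     for key in all_keys:
--         if key in env_a and key not in env_b:
--             lines.append(f"-{key}={env_a[key]}")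
--         elif key not in env_a and key in env_b:
--             lines.append(f"+{key}={env_b[key]}")
--         elif env_a[key] != env_b[key]:
--             lines.append(f"-{key}={env_a[key]}")
--             lines.append(f"+{key}={env_b[key]}")
--         else:
--             lines.append(f" {key}={env_a[key]}")
--     return lines
-- ===== SOURCE B (Python) =====
-- def build_unified_diff(env_a, env_b, label_a="a", label_b="b"):
--     """Two-pointer merge of the two sorted key lists instead of iterating
--     the sorted union with per-key membership tests."""
--     lines = [f"--- {label_a}", f"+++ {label_b}"]
--     ka = sorted(env_a)
--     kb = sorted(env_b)
--     i = j = 0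
--     while i < len(ka) and j < len(kb):
--         k, l = ka[i], kb[j]
--         if k < l:
--             lines.append(f"-{k}={env_a[k]}")
--             i += 1
--         elif l < k:
--             lines.append(f"+{l}={env_b[l]}")
--             j += 1
--         else:
--             va, vb = env_a[k], env_b[k]
--             if va != vb:
--                 lines.append(f"-{k}={va}")
--                 lines.append(f"+{k}={vb}")
--             else:
--                 lines.append(f" {k}={va}")
--             i += 1
--             j += 1
--     while i < len(ka):
--         k = ka[i]
--         lines.append(f"-{k}={env_a[k]}")
--         i += 1
--     while j < len(kb):
--         k = kb[j]
--         lines.append(f"+{k}={env_b[k]}")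
--         j += 1
--     return lines
-- ===== Notes on version B (the rewrite author's own statement) =====
-- stated objective: alternative
-- what changed: Replaces A's sorted set-union pass with per-key membership and lookup tests by a two-pointer merge over the two separately sorted key lists, emitting lines as the merge runs and draining the remaining tail.
import Mathlib
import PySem

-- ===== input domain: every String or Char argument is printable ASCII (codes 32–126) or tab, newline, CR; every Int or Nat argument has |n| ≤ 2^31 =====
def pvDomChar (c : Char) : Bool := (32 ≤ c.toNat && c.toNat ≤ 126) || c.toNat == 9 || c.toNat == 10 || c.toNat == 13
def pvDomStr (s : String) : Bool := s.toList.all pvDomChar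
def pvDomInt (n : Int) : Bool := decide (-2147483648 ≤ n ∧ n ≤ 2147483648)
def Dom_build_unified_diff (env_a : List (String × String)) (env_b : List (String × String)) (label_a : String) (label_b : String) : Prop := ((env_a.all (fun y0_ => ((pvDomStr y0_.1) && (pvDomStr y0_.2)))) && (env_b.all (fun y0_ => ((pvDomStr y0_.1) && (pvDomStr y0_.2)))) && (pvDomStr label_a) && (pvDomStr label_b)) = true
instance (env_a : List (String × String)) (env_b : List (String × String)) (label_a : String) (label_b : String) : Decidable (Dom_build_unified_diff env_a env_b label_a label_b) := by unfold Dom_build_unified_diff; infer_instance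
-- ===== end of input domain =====

-- B replaces A's sorted-set-union pass with per-key membership tests by a two-pointer
-- merge over the two separately sorted key lists (objective: alternative algorithm).

-- ===== PORT A =====
-- env_a[key] is only evaluated on branches where key is in the dict, so getD _ "" is exact there.
def build_unified_diff (env_a : List (String × String)) (env_b : List (String × String)) (label_a : String) (label_b : String) : List String :=
  let da := PySem.Dict.ofList env_a
  let db := PySem.Dict.ofList env_b
  let lines : List String := ["--- " ++ label_a, "+++ " ++ label_b]
  let all_keys := PySem.List.sorted (PySem.Set.union (PySem.Set.ofList da.keys) db.keys) (fun x => x) false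
  all_keys.foldl (fun lines key =>
    if da.contains key && !(db.contains key) then
      lines ++ ["-" ++ key ++ "=" ++ da.getD key ""]
    else if !(da.contains key) && db.contains key then
      lines ++ ["+" ++ key ++ "=" ++ db.getD key ""]
    else if da.getD key "" ≠ db.getD key "" then
      lines ++ ["-" ++ key ++ "=" ++ da.getD key "", "+" ++ key ++ "=" ++ db.getD key ""]
    else
      lines ++ [" " ++ key ++ "=" ++ da.getD key ""]) lines

-- ===== PORT B =====
-- the two-pointer merge loop of Source B: advance in ka, in kb, or in both; then drain the tails
def pvMergeDiff (da db : PySem.Dict String String) : List String → List String → List String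
  | [], kb => kb.map (fun l => "+" ++ l ++ "=" ++ db.getD l "")
  | k :: ka, [] => ("-" ++ k ++ "=" ++ da.getD k "") :: pvMergeDiff da db ka []
  | k :: ka, l :: kb =>
      if k < l then
        ("-" ++ k ++ "=" ++ da.getD k "") :: pvMergeDiff da db ka (l :: kb)
      else if l < k then
        ("+" ++ l ++ "=" ++ db.getD l "") :: pvMergeDiff da db (k :: ka) kb
      else
        let va := da.getD k ""
        let vb := db.getD k ""
        if va ≠ vb then
          ("-" ++ k ++ "=" ++ va) :: ("+" ++ k ++ "=" ++ vb) :: pvMergeDiff da db ka kb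
        else
          (" " ++ k ++ "=" ++ va) :: pvMergeDiff da db ka kb

def build_unified_diff_alt (env_a : List (String × String)) (env_b : List (String × String)) (label_a : String) (label_b : String) : List String :=
  let da := PySem.Dict.ofList env_a
  let db := PySem.Dict.ofList env_b
  let ka := PySem.List.sorted da.keys (fun x => x) false
  let kb := PySem.List.sorted db.keys (fun x => x) false
  ["--- " ++ label_a, "+++ " ++ label_b] ++ pvMergeDiff da db ka kb

-- ===== PRECONDITION & SPEC =====
def Spec_build_unified_diff (env_a : List (String × String)) (env_b : List (String × String)) (label_a : String) (label_b : String) (out : List String) : Prop := out = build_unified_diff_alt env_a env_b label_a label_b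
instance (env_a : List (String × String)) (env_b : List (String × String)) (label_a : String) (label_b : String) (out : List String) : Decidable (Spec_build_unified_diff env_a env_b label_a label_b out) := by unfold Spec_build_unified_diff; infer_instance

-- ===== CLAIM (what is proved, stated in full; the proofs are below) =====
def Claim_equal_build_unified_diff : Prop := ∀ (env_a : List (String × String)) (env_b : List (String × String)) (label_a : String) (label_b : String), Dom_build_unified_diff env_a env_b label_a label_b → Spec_build_unified_diff env_a env_b label_a label_b (build_unified_diff env_a env_b label_a label_b)

-- ===== LEMMAS AND PROOFS =====

-- A's per-key emitted lines
def pvLine (da db : PySem.Dict String String) (key : String) : List String :=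
  if da.contains key && !(db.contains key) then ["-" ++ key ++ "=" ++ da.getD key ""]
  else if !(da.contains key) && db.contains key then ["+" ++ key ++ "=" ++ db.getD key ""]
  else if da.getD key "" ≠ db.getD key "" then
    ["-" ++ key ++ "=" ++ da.getD key "", "+" ++ key ++ "=" ++ db.getD key ""]
  else [" " ++ key ++ "=" ++ da.getD key ""]

-- the key merge underlying pvMergeDiff
def pvUnion : List String → List String → List String
  | [], kb => kb
  | k :: ka, [] => k :: pvUnion ka []
  | k :: ka, l :: kb =>
      if k < l then k :: pvUnion ka (l :: kb)
      else if l < k then l :: pvUnion (k :: ka) kb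
      else k :: pvUnion ka kb

theorem mem_pvUnion (x : String) (ka kb : List String) :
    x ∈ pvUnion ka kb ↔ x ∈ ka ∨ x ∈ kb := by
  fun_induction pvUnion ka kb with
  | case1 kb => simp
  | case2 k ka ih => simp [ih]
  | case3 k ka l kb h ih => simp only [List.mem_cons, ih]; tauto
  | case4 k ka l kb h1 h2 ih =>
      simp only [List.mem_cons, ih]; tauto
  | case5 k ka l kb h1 h2 ih =>
      have hkl : k = l := le_antisymm (le_of_not_gt h2) (le_of_not_gt h1)
      subst hkl
      simp only [List.mem_cons, ih]; tauto

theorem pairwise_pvUnion (ka kb : List String)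
    (ha : ka.Pairwise (· < ·)) (hb : kb.Pairwise (· < ·)) :
    (pvUnion ka kb).Pairwise (· < ·) := by
  fun_induction pvUnion ka kb with
  | case1 kb => exact hb
  | case2 k ka ih =>
      rw [List.pairwise_cons] at ha
      refine List.pairwise_cons.2 ⟨?_, ih ha.2 hb⟩
      intro y hy
      rcases (mem_pvUnion y ka []).1 hy with h | h
      · exact ha.1 y h
      · simp at h
  | case3 k ka l kb hkl ih =>
      rw [List.pairwise_cons] at ha
      refine List.pairwise_cons.2 ⟨?_, ih ha.2 hb⟩
      intro y hy
      rcases (mem_pvUnion y ka (l :: kb)).1 hy with h | h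
      · exact ha.1 y h
      · rcases List.mem_cons.1 h with rfl | h
        · exact hkl
        · exact lt_trans hkl ((List.pairwise_cons.1 hb).1 y h)
  | case4 k ka l kb h1 hlk ih =>
      rw [List.pairwise_cons] at hb
      refine List.pairwise_cons.2 ⟨?_, ih ha hb.2⟩
      intro y hy
      rcases (mem_pvUnion y (k :: ka) kb).1 hy with h | h
      · rcases List.mem_cons.1 h with rfl | h
        · exact hlk
        · exact lt_trans hlk ((List.pairwise_cons.1 ha).1 y h)
      · exact hb.1 y h
  | case5 k ka l kb h1 h2 ih =>
      have hkl : k = l := le_antisymm (le_of_not_gt h2) (le_of_not_gt h1)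
      subst hkl
      rw [List.pairwise_cons] at ha hb
      refine List.pairwise_cons.2 ⟨?_, ih ha.2 hb.2⟩
      intro y hy
      rcases (mem_pvUnion y ka kb).1 hy with h | h
      · exact ha.1 y h
      · exact hb.1 y h

theorem nodup_of_pairwise_lt {l : List String} (h : l.Pairwise (· < ·)) : l.Nodup :=
  h.imp (fun hlt => ne_of_lt hlt)

-- B's final drain of kb emits A's lines for keys only in env_b
theorem pvDrainB (da db : PySem.Dict String String) (kb : List String)
    (hb : ∀ l ∈ kb, db.contains l = true) (hna : ∀ l ∈ kb, da.contains l = false) :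
    kb.map (fun l => "+" ++ l ++ "=" ++ db.getD l "") = kb.flatMap (pvLine da db) := by
  induction kb with
  | nil => simp
  | cons l kb ih =>
      have hcb := hb l (by simp)
      have hca := hna l (by simp)
      simp only [List.map_cons, List.flatMap_cons]
      rw [ih (fun x hx => hb x (List.mem_cons_of_mem _ hx))
            (fun x hx => hna x (List.mem_cons_of_mem _ hx))]
      simp [pvLine, hca, hcb]

-- the B-side merge emits exactly A's per-key lines for the merged key list
theorem pvMergeDiff_eq_flatMap (da db : PySem.Dict String String) (ka kb : List String)
    (ha : ∀ k ∈ ka, da.contains k = true) (hb : ∀ l ∈ kb, db.contains l = true)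
    (sa : ka.Pairwise (· < ·)) (sb : kb.Pairwise (· < ·))
    (hab : ∀ k ∈ ka, db.contains k = true → k ∈ kb)
    (hba : ∀ l ∈ kb, da.contains l = true → l ∈ ka) :
    pvMergeDiff da db ka kb = (pvUnion ka kb).flatMap (pvLine da db) := by
  fun_induction pvMergeDiff da db ka kb with
  | case1 kb =>
      simp only [pvUnion]
      exact pvDrainB da db kb hb (fun l hl => by
        by_contra h
        have := hba l hl (by simpa using h)
        simp at this)
  | case2 k ka ih =>
      have hca : da.contains k = true := ha k (by simp)
      have hcb : db.contains k = false := by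
        by_contra h
        have := hab k (by simp) (by simpa using h)
        simp at this
      simp only [pvUnion]
      rw [List.flatMap_cons]
      rw [ih (fun x hx => ha x (List.mem_cons_of_mem _ hx)) hb sa.tail sb
          (fun x hx h => by simpa using hab x (List.mem_cons_of_mem _ hx) h)
          (fun x hx h => by simp at hx)]
      simp [pvLine, hca, hcb]
  | case3 k ka l kb hkl ih =>
      have hca : da.contains k = true := ha k (by simp)
      have hcb : db.contains k = false := by
        by_contra h
        have hmem := hab k (by simp) (by simpa using h)
        rcases List.mem_cons.1 hmem with rfl | hmem
        · exact absurd hkl (lt_irrefl _)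
        · exact absurd (lt_trans hkl ((List.pairwise_cons.1 sb).1 k hmem)) (lt_irrefl _)
      have hba' : ∀ y ∈ l :: kb, da.contains y = true → y ∈ ka := by
        intro y hy h
        rcases List.mem_cons.1 (hba y hy h) with rfl | hy'
        · exfalso
          rcases List.mem_cons.1 hy with rfl | hy2
          · exact absurd hkl (lt_irrefl _)
          · exact absurd (lt_trans hkl ((List.pairwise_cons.1 sb).1 y hy2)) (lt_irrefl _)
        · exact hy'
      simp only [pvUnion]
      rw [if_pos hkl, List.flatMap_cons]
      rw [ih (fun x hx => ha x (List.mem_cons_of_mem _ hx)) hb sa.tail sb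
          (fun x hx h => hab x (List.mem_cons_of_mem _ hx) h) hba']
      simp [pvLine, hca, hcb]
  | case4 k ka l kb h1 hlk ih =>
      have hcb : db.contains l = true := hb l (by simp)
      have hca : da.contains l = false := by
        by_contra h
        have hmem := hba l (by simp) (by simpa using h)
        rcases List.mem_cons.1 hmem with rfl | hmem
        · exact absurd hlk (lt_irrefl _)
        · exact absurd (lt_trans hlk ((List.pairwise_cons.1 sa).1 l hmem)) (lt_irrefl _)
      have hab' : ∀ y ∈ k :: ka, db.contains y = true → y ∈ kb := by
        intro y hy h
        rcases List.mem_cons.1 (hab y hy h) with rfl | hy'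
        · exfalso
          rcases List.mem_cons.1 hy with rfl | hy2
          · exact absurd hlk (lt_irrefl _)
          · exact absurd (lt_trans hlk ((List.pairwise_cons.1 sa).1 y hy2)) (lt_irrefl _)
        · exact hy'
      simp only [pvUnion]
      rw [if_neg h1, if_pos hlk, List.flatMap_cons]
      rw [ih ha (fun x hx => hb x (List.mem_cons_of_mem _ hx)) sa sb.tail
          hab' (fun x hx h => hba x (List.mem_cons_of_mem _ hx) h)]
      simp [pvLine, hca, hcb]
  | case5 k ka l kb h1 h2 va vb hv ih =>
      have hkl : k = l := le_antisymm (le_of_not_gt h2) (le_of_not_gt h1)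
      subst hkl
      have hca : da.contains k = true := ha k (by simp)
      have hcb : db.contains k = true := hb k (by simp)
      have hab' : ∀ y ∈ ka, db.contains y = true → y ∈ kb := by
        intro y hy h
        rcases List.mem_cons.1 (hab y (List.mem_cons_of_mem _ hy) h) with rfl | hy'
        · exact absurd ((List.pairwise_cons.1 sa).1 y hy) (lt_irrefl _)
        · exact hy'
      have hba' : ∀ y ∈ kb, da.contains y = true → y ∈ ka := by
        intro y hy h
        rcases List.mem_cons.1 (hba y (List.mem_cons_of_mem _ hy) h) with rfl | hy'
        · exact absurd ((List.pairwise_cons.1 sb).1 y hy) (lt_irrefl _)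
        · exact hy'
      simp only [pvUnion]
      rw [if_neg h1, if_neg h2, List.flatMap_cons]
      rw [ih (fun x hx => ha x (List.mem_cons_of_mem _ hx))
          (fun x hx => hb x (List.mem_cons_of_mem _ hx)) sa.tail sb.tail hab' hba']
      simp [pvLine, hca, hcb, va, vb, hv]
  | case6 k ka l kb h1 h2 va vb hv ih =>
      have hkl : k = l := le_antisymm (le_of_not_gt h2) (le_of_not_gt h1)
      subst hkl
      have hca : da.contains k = true := ha k (by simp)
      have hcb : db.contains k = true := hb k (by simp)
      have hab' : ∀ y ∈ ka, db.contains y = true → y ∈ kb := by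
        intro y hy h
        rcases List.mem_cons.1 (hab y (List.mem_cons_of_mem _ hy) h) with rfl | hy'
        · exact absurd ((List.pairwise_cons.1 sa).1 y hy) (lt_irrefl _)
        · exact hy'
      have hba' : ∀ y ∈ kb, da.contains y = true → y ∈ ka := by
        intro y hy h
        rcases List.mem_cons.1 (hba y (List.mem_cons_of_mem _ hy) h) with rfl | hy'
        · exact absurd ((List.pairwise_cons.1 sb).1 y hy) (lt_irrefl _)
        · exact hy'
      simp only [pvUnion]
      rw [if_neg h1, if_neg h2, List.flatMap_cons]
      rw [ih (fun x hx => ha x (List.mem_cons_of_mem _ hx))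
          (fun x hx => hb x (List.mem_cons_of_mem _ hx)) sa.tail sb.tail hab' hba']
      simp [pvLine, hca, hcb, va, vb, hv]

-- A's sorted union of the key sets IS the merge of the two sorted key lists
theorem sorted_union_eq_pvUnion (da db : PySem.Dict String String)
    (hna : da.keys.Nodup) (hnb : db.keys.Nodup) :
    PySem.List.sorted (PySem.Set.union (PySem.Set.ofList da.keys) db.keys) (fun x => x) false
      = pvUnion (PySem.List.sorted da.keys (fun x => x) false)
                (PySem.List.sorted db.keys (fun x => x) false) := by
  have ska : (PySem.List.sorted da.keys (fun x => x) false).Pairwise (· < ·) := by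
    rw [← PySem.Set.ofList_eq_self_of_nodup da.keys hna]
    exact PySem.List.sorted_ofList_pairwise_lt _
  have skb : (PySem.List.sorted db.keys (fun x => x) false).Pairwise (· < ·) := by
    rw [← PySem.Set.ofList_eq_self_of_nodup db.keys hnb]
    exact PySem.List.sorted_ofList_pairwise_lt _
  have hpw := pairwise_pvUnion _ _ ska skb
  apply PySem.List.sorted_eq_of_perm_of_pairwise_lt
  · refine (List.perm_ext_iff_of_nodup (nodup_of_pairwise_lt hpw) ?_).2 ?_
    · exact PySem.Set.nodup_union _ _ (PySem.Set.nodup_ofList _)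
    · intro x
      rw [mem_pvUnion, PySem.Set.mem_union, PySem.Set.mem_ofList,
          PySem.List.mem_sorted, PySem.List.mem_sorted]
  · exact hpw

-- ===== VERDICT (by name: the statement is the Claim_ definition above) =====
theorem build_unified_diff_spec : Claim_equal_build_unified_diff := by
  intro env_a env_b label_a label_b _
  unfold Spec_build_unified_diff build_unified_diff build_unified_diff_alt
  dsimp only
  set da := PySem.Dict.ofList env_a with hda
  set db := PySem.Dict.ofList env_b with hdb
  have hna : da.keys.Nodup := PySem.Dict.nodup_keys_ofList _
  have hnb : db.keys.Nodup := PySem.Dict.nodup_keys_ofList _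
  have hbody : (fun (lines : List String) key =>
      if da.contains key && !(db.contains key) then
        lines ++ ["-" ++ key ++ "=" ++ da.getD key ""]
      else if !(da.contains key) && db.contains key then
        lines ++ ["+" ++ key ++ "=" ++ db.getD key ""]
      else if da.getD key "" ≠ db.getD key "" then
        lines ++ ["-" ++ key ++ "=" ++ da.getD key "", "+" ++ key ++ "=" ++ db.getD key ""]
      else
        lines ++ [" " ++ key ++ "=" ++ da.getD key ""])
      = (fun lines key => lines ++ pvLine da db key) := by
    funext lines key
    unfold pvLine
    split_ifs <;> rfl
  rw [hbody, PySem.List.foldl_append_eq_flatMap, sorted_union_eq_pvUnion da db hna hnb]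
  have ska : (PySem.List.sorted da.keys (fun x => x) false).Pairwise (· < ·) := by
    rw [← PySem.Set.ofList_eq_self_of_nodup da.keys hna]
    exact PySem.List.sorted_ofList_pairwise_lt _
  have skb : (PySem.List.sorted db.keys (fun x => x) false).Pairwise (· < ·) := by
    rw [← PySem.Set.ofList_eq_self_of_nodup db.keys hnb]
    exact PySem.List.sorted_ofList_pairwise_lt _
  rw [pvMergeDiff_eq_flatMap da db _ _
      (fun k hk => by
        rw [PySem.Dict.contains_eq_decide_mem_keys]
        simpa using (PySem.List.mem_sorted _ _ _ _).1 hk)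
      (fun l hl => by
        rw [PySem.Dict.contains_eq_decide_mem_keys]
        simpa using (PySem.List.mem_sorted _ _ _ _).1 hl)
      ska skb
      (fun k _ h => by
        rw [PySem.List.mem_sorted]
        rw [PySem.Dict.contains_eq_decide_mem_keys] at h
        simpa using h)
      (fun l _ h => by
        rw [PySem.List.mem_sorted]
        rw [PySem.Dict.contains_eq_decide_mem_keys] at h
        simpa using h)]
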